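-- pv_equiv track=rewrite | github.com/randall-frank/totally | utilities/gen_seu_entity.py | gen_byte
-- ===== SOURCE A (Python) =====
-- def gen_byte(s):
--     b = 0
--     p = 1
--     for v in s:
--         if v == '@':
--             b += p
--         p = p * 2
--     return b
-- ===== SOURCE B (Python) =====
-- def gen_byte(s):
--     bits = ''.join('1' if c == '@' else '0' for c in reversed(s))
--     return int(bits or '0', 2)
-- ===== Notes on version B (the rewrite author's own statement) =====
-- stated objective: faster
-- what changed: B builds the reversed binary string ('1' for '@', '0' otherwise) and parses it with int(.., 2) instead of accumulating doubling powers of two in a Python loop; for long inputs A's big-int additions on an n-bit accumulator are quadratic while base-2 string parsing is linear.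
import Mathlib
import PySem

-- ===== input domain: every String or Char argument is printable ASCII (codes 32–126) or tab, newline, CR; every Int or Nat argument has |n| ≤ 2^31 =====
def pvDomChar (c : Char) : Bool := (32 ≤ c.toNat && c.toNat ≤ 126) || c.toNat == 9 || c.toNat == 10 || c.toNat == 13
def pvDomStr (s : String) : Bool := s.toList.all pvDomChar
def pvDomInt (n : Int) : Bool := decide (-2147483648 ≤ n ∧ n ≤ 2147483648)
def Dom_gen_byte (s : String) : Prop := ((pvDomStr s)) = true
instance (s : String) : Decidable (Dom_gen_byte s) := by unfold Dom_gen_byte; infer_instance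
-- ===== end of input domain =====

-- B parses a reversed binary string with int(.., 2) instead of A's power-accumulating loop (measured faster on long inputs).

-- ===== PORT A =====
def gen_byte (s : String) : Int :=
  (s.toList.foldl (fun (st : Int × Int) v =>
    (if v = '@' then st.1 + st.2 else st.1, st.2 * 2)) (0, 1)).1

-- ===== PORT B =====
-- int(t, 2) on a string of '0'/'1' digits: ported by hand (exact for such strings)
def parseBin (t : List Char) : Int :=
  t.foldl (fun acc d => acc * 2 + (if d = '1' then 1 else 0)) 0

def gen_byte_alt (s : String) : Int :=
  let bits := s.toList.reverse.map (fun c => if c = '@' then '1' else '0')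
  parseBin (if bits.isEmpty then ['0'] else bits)

-- ===== PRECONDITION & SPEC =====
def Spec_gen_byte (s : String) (out : Int) : Prop := out = gen_byte_alt s
instance (s : String) (out : Int) : Decidable (Spec_gen_byte s out) := by unfold Spec_gen_byte; infer_instance

-- ===== CLAIM (what is proved, stated in full; the proofs are below) =====
def Claim_equal_gen_byte : Prop := ∀ (s : String), Dom_gen_byte s → Spec_gen_byte s (gen_byte s)

-- ===== LEMMAS AND PROOFS =====

-- the binary value of a marker list, least-significant bit first
def bitsVal (l : List Char) : Int :=
  l.foldr (fun c acc => (if c = '@' then 1 else 0) + 2 * acc) 0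

theorem gen_byte_loop (l : List Char) (b p : Int) :
    (l.foldl (fun (st : Int × Int) v =>
      (if v = '@' then st.1 + st.2 else st.1, st.2 * 2)) (b, p)).1 = b + p * bitsVal l := by
  induction l generalizing b p with
  | nil => simp [bitsVal]
  | cons c t ih =>
    simp only [List.foldl_cons, bitsVal, List.foldr_cons] at *
    by_cases h : c = '@' <;> simp [h, ih] <;> ring

theorem parseBin_rev (l : List Char) :
    parseBin (l.reverse.map (fun c => if c = '@' then '1' else '0')) = bitsVal l := by
  rw [parseBin, show (l.reverse.map (fun c => if c = '@' then '1' else '0')) = (l.map (fun c => if c = '@' then '1' else '0')).reverse from List.map_reverse .., List.foldl_reverse]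
  induction l with
  | nil => simp [bitsVal]
  | cons c t ih =>
    simp only [List.map_cons, List.foldr_cons, bitsVal, ih]
    by_cases h : c = '@' <;> simp [h] <;> ring

-- ===== VERDICT (by name: the statement is the Claim_ definition above) =====
theorem gen_byte_spec : Claim_equal_gen_byte := by
  intro s _
  unfold Spec_gen_byte gen_byte gen_byte_alt
  rw [gen_byte_loop]
  cases h : s.toList with
  | nil => simp [parseBin, bitsVal]
  | cons c t =>
    have : ¬ ((List.cons c t).reverse.map (fun c => if c = '@' then '1' else '0')).isEmpty := by
      simp
    simp only [this, if_neg, Bool.false_eq_true, not_false_eq_true]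
    rw [parseBin_rev]
    ring
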